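-- pv_equiv track=rewrite | github.com/neroexpress/GitHubRepo | Amne/subranges.py | number_of_decreasing_Subranges
-- ===== SOURCE A (Python) =====
-- def number_of_decreasing_Subranges(window):
-- 	'''
-- 	This function returns the number of decreasing subranges.
-- 	'''
-- 	decreasing_subrange = 0
-- 	for j in range(len(window)-1):
-- 		for i in range(len(window)-1):
-- 			new_window = window[j:len(window)-i]
-- 			if len(new_window)<2:continue
-- 			if all(new_window[p] > new_window[p+1] for p in range(len(new_window)-1)):
-- 				decreasing_subrange +=1
-- 	return decreasing_subrange
-- ===== SOURCE B (Python) =====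
-- def number_of_decreasing_Subranges(window):
--     '''
--     One reverse pass: run = length of the maximal strictly decreasing run
--     starting at j; each such run start contributes run-1 subranges.
--     '''
--     total = 0
--     run = 1
--     for j in range(len(window) - 2, -1, -1):
--         run = run + 1 if window[j] > window[j + 1] else 1
--         total += run - 1
--     return total
-- ===== Notes on version B (the rewrite author's own statement) =====
-- stated objective: faster
-- what changed: Replaces A's double loop over all (start,end) pairs with slicing and a full pairwise re-check per slice by a single reverse pass that maintains the length of the maximal strictly decreasing run starting at the current index and adds run-1 per position.
import Mathlib
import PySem

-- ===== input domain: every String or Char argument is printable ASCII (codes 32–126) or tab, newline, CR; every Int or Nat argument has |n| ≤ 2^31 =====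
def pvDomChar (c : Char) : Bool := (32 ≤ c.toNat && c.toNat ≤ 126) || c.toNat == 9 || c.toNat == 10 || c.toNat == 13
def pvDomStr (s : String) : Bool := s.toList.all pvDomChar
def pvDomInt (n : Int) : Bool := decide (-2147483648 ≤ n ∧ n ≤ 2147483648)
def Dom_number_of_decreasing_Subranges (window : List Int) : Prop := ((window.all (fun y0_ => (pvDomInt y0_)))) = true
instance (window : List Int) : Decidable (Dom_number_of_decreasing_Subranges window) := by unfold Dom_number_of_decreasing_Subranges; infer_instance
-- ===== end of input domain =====

-- B replaces A's O(n^3)-slice double loop by one reverse pass maintaining the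
-- length of the maximal decreasing run starting at the current index (objective: faster).

-- ===== PORT A =====
-- the generator `all(new_window[p] > new_window[p+1] for p in range(len(new_window)-1))`;
-- both indices are always in range in the Python, so pyGetD's default 0 is never used
def pvDecAll (nw : List Int) : Bool :=
  (PySem.List.pyRange 0 ((nw.length : Int) - 1)).all
    (fun p => decide (PySem.List.pyGetD nw p 0 > PySem.List.pyGetD nw (p + 1) 0))

def number_of_decreasing_Subranges (window : List Int) : Int :=
  (PySem.List.pyRange 0 ((window.length : Int) - 1)).foldl (fun acc j =>
    (PySem.List.pyRange 0 ((window.length : Int) - 1)).foldl (fun acc2 i =>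
      let nw := PySem.List.slice window (some j) (some ((window.length : Int) - i))
      if nw.length < 2 then acc2
      else if pvDecAll nw then acc2 + 1 else acc2) acc) 0

-- ===== PORT B =====
-- Source B's loop `for j in range(len(window)-2, -1, -1)` reads window[j], window[j+1],
-- i.e. it consumes the adjacent pairs right-to-left: a foldr over zip window window[1:]
-- with state (total, run)
def number_of_decreasing_Subranges_alt (window : List Int) : Int :=
  ((window.zip window.tail).foldr
    (fun ab s =>
      let run : Int := if ab.1 > ab.2 then s.2 + 1 else 1
      (s.1 + (run - 1), run)) (0, 1)).1

-- ===== PRECONDITION & SPEC =====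
def Spec_number_of_decreasing_Subranges (window : List Int) (out : Int) : Prop := out = number_of_decreasing_Subranges_alt window
instance (window : List Int) (out : Int) : Decidable (Spec_number_of_decreasing_Subranges window out) := by unfold Spec_number_of_decreasing_Subranges; infer_instance

-- ===== CLAIM (what is proved, stated in full; the proofs are below) =====
def Claim_equal_number_of_decreasing_Subranges : Prop := ∀ (window : List Int), Dom_number_of_decreasing_Subranges window → Spec_number_of_decreasing_Subranges window (number_of_decreasing_Subranges window)

-- ===== LEMMAS AND PROOFS =====

-- proof-side helpers: adjacent-pairwise decrease, length of the maximal decreasing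
-- prefix, and the per-suffix sum both programs compute
def decB : List Int → Bool
  | x :: y :: t => decide (x > y) && decB (y :: t)
  | _ => true

def pRun : List Int → Nat
  | [] => 0
  | [_] => 1
  | x :: y :: t => if x > y then pRun (y :: t) + 1 else 1

def Ssum : List Int → Int
  | [] => 0
  | x :: l => Ssum l + ((pRun (x :: l) : Int) - 1)

theorem pRun_pos (x : Int) (l : List Int) : 1 ≤ pRun (x :: l) := by
  cases l with
  | nil => simp [pRun]
  | cons y t => simp only [pRun]; split <;> omega

theorem pRun_le : ∀ (l : List Int), pRun l ≤ l.length := by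
  intro l
  induction l with
  | nil => simp [pRun]
  | cons x l ih =>
    cases l with
    | nil => simp [pRun]
    | cons y t => simp only [pRun, List.length_cons] at *; split <;> omega

theorem all_range_decB : ∀ (nw : List Int),
    ((List.range (nw.length - 1)).all
      (fun k => decide (nw.getD k 0 > nw.getD (k + 1) 0))) = decB nw := by
  intro nw
  induction nw with
  | nil => simp [decB]
  | cons x l ih =>
    cases l with
    | nil => simp [decB]
    | cons y t =>
      have hlen : (x :: y :: t).length - 1 = (y :: t).length - 1 + 1 := by simp
      rw [hlen, List.range_succ_eq_map, List.all_cons, List.all_map]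
      simp only [decB]
      rw [← ih]
      congr 1

theorem decAll_eq_decB (nw : List Int) : pvDecAll nw = decB nw := by
  cases nw with
  | nil => decide
  | cons x l =>
    unfold pvDecAll
    have h1 : ((x :: l).length : Int) - 1 = ((l.length : Nat) : Int) := by
      simp
    rw [h1, PySem.List.pyRange_zero_natCast, List.all_map]
    rw [← all_range_decB (x :: l)]
    have h2 : (x :: l).length - 1 = l.length := by simp
    rw [h2]
    congr 1
    funext k
    have hk1 : ((k : Int) + 1) = ((k + 1 : Nat) : Int) := by push_cast; ring
    simp only [Function.comp_apply]
    rw [hk1, PySem.List.pyGetD_natCast, PySem.List.pyGetD_natCast]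

theorem decB_take : ∀ (l : List Int) (m : Nat), m ≤ l.length →
    (decB (l.take m) = true ↔ m ≤ pRun l) := by
  intro l
  induction l with
  | nil =>
    intro m hm
    have : m = 0 := by simpa using hm
    subst this; simp [decB, pRun]
  | cons x l ih =>
    cases l with
    | nil =>
      intro m hm
      simp only [List.length_singleton] at hm
      interval_cases m <;> simp [decB, pRun]
    | cons y t =>
      intro m hm
      match m with
      | 0 => simp [decB, pRun]
      | 1 =>
        simp only [List.take_succ_cons, List.take_zero, decB]
        simpa using pRun_pos x (y :: t)
      | (k + 2) =>
        have h' : k + 1 ≤ (y :: t).length := by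
          simp only [List.length_cons] at hm ⊢; omega
        have ihk := ih (k + 1) h'
        simp only [List.take_succ_cons] at ihk ⊢
        simp only [decB, Bool.and_eq_true, decide_eq_true_eq, pRun]
        by_cases hxy : x > y
        · simp only [if_pos hxy, ihk]
          constructor
          · rintro ⟨_, h⟩; omega
          · intro h; exact ⟨hxy, by omega⟩
        · simp only [if_neg hxy]
          constructor
          · rintro ⟨h, _⟩; exact absurd h hxy
          · intro h; omega

theorem countP_range_band (lo hi : Nat) : ∀ (N : Nat),
    List.countP (fun p => decide (lo ≤ p) && decide (p ≤ hi)) (List.range N)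
      = min N (hi + 1) - min N lo := by
  intro N
  induction N with
  | zero => simp
  | succ n ih =>
    rw [List.range_succ, List.countP_append, ih]
    by_cases h1 : lo ≤ n <;> by_cases h2 : n ≤ hi <;>
      simp [h1, h2] <;> omega

theorem inner_fold_count (w : List Int) (j : Int) : ∀ (L : List Int) (acc : Int),
    L.foldl (fun acc2 i =>
        let nw := PySem.List.slice w (some j) (some ((w.length : Int) - i))
        if nw.length < 2 then acc2
        else if pvDecAll nw then acc2 + 1 else acc2) acc
      = acc + (L.countP (fun i =>
          !decide ((PySem.List.slice w (some j) (some ((w.length : Int) - i))).length < 2)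
            && pvDecAll (PySem.List.slice w (some j) (some ((w.length : Int) - i)))) : Int) := by
  intro L
  induction L with
  | nil => simp
  | cons x t ih =>
    intro acc
    simp only [List.foldl_cons, List.countP_cons]
    rw [ih]
    by_cases h1 : (PySem.List.slice w (some j) (some ((w.length : Int) - x))).length < 2 <;>
      by_cases h2 : pvDecAll (PySem.List.slice w (some j) (some ((w.length : Int) - x))) <;>
      simp [h1, h2] <;> omega

theorem inner_count (w : List Int) (jn : Nat) (h : jn + 2 ≤ w.length) :
    ((PySem.List.pyRange 0 ((w.length : Int) - 1)).countP
      (fun i => !decide ((PySem.List.slice w (some (jn : Int)) (some ((w.length : Int) - i))).length < 2)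
          && pvDecAll (PySem.List.slice w (some (jn : Int)) (some ((w.length : Int) - i)))) : Int)
      = (pRun (w.drop jn) : Int) - 1 := by
  set L := w.length with hLdef
  have hL1 : ((L : Int) - 1) = ((L - 1 : Nat) : Int) := by omega
  rw [hL1, PySem.List.pyRange_zero_natCast, List.countP_map]
  have hslen : (w.drop jn).length = L - jn := by simp [hLdef]
  have hp1 : 1 ≤ pRun (w.drop jn) := by
    have hne : w.drop jn ≠ [] := by
      intro hnil; rw [hnil] at hslen; simp at hslen; omega
    match hq : w.drop jn, hne with
    | x :: l, _ => exact pRun_pos x l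
  have hple : pRun (w.drop jn) ≤ L - jn := hslen ▸ pRun_le (w.drop jn)
  have hcongr : List.countP
      ((fun i => !decide ((PySem.List.slice w (some (jn : Int)) (some ((L : Int) - i))).length < 2)
          && pvDecAll (PySem.List.slice w (some (jn : Int)) (some ((L : Int) - i)))) ∘ (fun k : Nat => (k : Int)))
      (List.range (L - 1))
      = List.countP (fun p => decide (L - jn - pRun (w.drop jn) ≤ p) && decide (p ≤ L - jn - 2)) (List.range (L - 1)) := by
    apply List.countP_congr
    intro pn hpn
    have hpnlt : pn < L - 1 := List.mem_range.mp hpn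
    have hsub : ((L : Int) - (pn : Int)) = ((L - pn : Nat) : Int) := by omega
    simp only [Function.comp, hsub, PySem.List.slice_natCast]
    have htake : (List.take (L - pn - jn) (List.drop jn w)).length = L - pn - jn := by
      rw [List.length_take, hslen]; omega
    rw [decAll_eq_decB]
    have hdec := decB_take (w.drop jn) (L - pn - jn) (by omega)
    simp only [htake, Bool.and_eq_true, Bool.not_eq_true', decide_eq_false_iff_not,
      decide_eq_true_eq, hdec]
    omega
  rw [hcongr, countP_range_band]
  omega

theorem sum_pruns : ∀ (w : List Int), w ≠ [] →
    ((List.range (w.length - 1)).map (fun j => ((pRun (w.drop j) : Int) - 1))).sum = Ssum w := by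
  intro w
  induction w with
  | nil => intro h; exact absurd rfl h
  | cons x l ih =>
    intro _
    cases l with
    | nil => simp [Ssum, pRun]
    | cons y t =>
      have hlen : (x :: y :: t).length - 1 = (y :: t).length - 1 + 1 := by simp
      rw [hlen, List.range_succ_eq_map, List.map_cons, List.map_map, List.sum_cons]
      have hmap : ((List.range ((y :: t).length - 1)).map
          ((fun j => ((pRun ((x :: y :: t).drop j) : Int) - 1)) ∘ Nat.succ)).sum
          = ((List.range ((y :: t).length - 1)).map (fun j => ((pRun ((y :: t).drop j) : Int) - 1))).sum := by
        congr 1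
      rw [hmap, ih (by simp)]
      simp only [List.drop_zero, Ssum]
      ring

theorem a_eq_Ssum (w : List Int) : number_of_decreasing_Subranges w = Ssum w := by
  cases w with
  | nil => decide
  | cons x l =>
    unfold number_of_decreasing_Subranges
    refine (PySem.List.foldl_congr_mem _ _
      (fun acc j => acc + ((pRun ((x :: l).drop j.toNat) : Int) - 1)) 0 ?_).trans ?_
    · intro acc j hj
      obtain ⟨h0, hlt⟩ := PySem.List.mem_pyRange_one.mp hj
      have hjn : ((j.toNat : Nat) : Int) = j := Int.toNat_of_nonneg h0
      have hh : j.toNat + 2 ≤ (x :: l).length := by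
        simp only [List.length_cons] at hlt ⊢
        omega
      refine Eq.trans ?_ (congrArg (HAdd.hAdd acc) (inner_count (x :: l) j.toNat hh))
      rw [← hjn]
      exact inner_fold_count (x :: l) ((j.toNat : Nat) : Int)
        (PySem.List.pyRange 0 (((x :: l).length : Int) - 1)) acc
    · have h1 : (((x :: l).length : Int) - 1) = ((l.length : Nat) : Int) := by simp
      rw [PySem.List.foldl_add, h1, PySem.List.pyRange_zero_natCast, List.map_map]
      have hmap : ((List.range l.length).map
          ((fun j : Int => (pRun ((x :: l).drop j.toNat) : Int) - 1) ∘ (fun k : Nat => (k : Int)))).sum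
          = ((List.range l.length).map (fun k => (pRun ((x :: l).drop k) : Int) - 1)).sum := by
        congr 1
      rw [hmap]
      have hlen2 : l.length = (x :: l).length - 1 := by simp
      rw [hlen2, sum_pruns (x :: l) (by simp)]
      ring

-- B computes Ssum: the reverse pass keeps (total so far, current run length)
theorem alt_fold (x : Int) : ∀ (l : List Int),
    ((x :: l).zip l).foldr
      (fun ab s =>
        let run : Int := if ab.1 > ab.2 then s.2 + 1 else 1
        (s.1 + (run - 1), run)) (0, 1)
      = (Ssum (x :: l), (pRun (x :: l) : Int)) := by
  intro l
  induction l generalizing x with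
  | nil => simp [Ssum, pRun]
  | cons y t ih =>
    rw [List.zip_cons_cons, List.foldr_cons, ih y]
    simp only [Ssum, pRun]
    by_cases hxy : x > y <;> simp [hxy]

theorem alt_eq_Ssum (w : List Int) : number_of_decreasing_Subranges_alt w = Ssum w := by
  cases w with
  | nil => decide
  | cons x l =>
    unfold number_of_decreasing_Subranges_alt
    rw [List.tail_cons, alt_fold x l]

-- ===== VERDICT (by name: the statement is the Claim_ definition above) =====
theorem number_of_decreasing_Subranges_spec : Claim_equal_number_of_decreasing_Subranges := by
  intro window _
  unfold Spec_number_of_decreasing_Subranges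
  rw [a_eq_Ssum, alt_eq_Ssum]
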